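-- pv_equiv track=rewrite | github.com/anonymous-sub-repo-2026/project-cvpr26 | nli/utils.py | parse_section_payload
-- ===== SOURCE A (Python) =====
-- from typing import Tuple
--
-- def parse_section_payload(text: str) -> Tuple[str, str, str]:
--     doc_title = "unknown"
--     section_title = "unknown"
--     body_lines: list[str] = []
--     for line in (text or "").splitlines():
--         stripped = line.strip()
--         if stripped.startswith("# Wiki Article:"):
--             doc_title = stripped.split(":", 1)[-1].strip()
--         elif stripped.startswith("## Section Title:"):
--             section_title = stripped.split(":", 1)[-1].strip()
--         else:
--             body_lines.append(line)
--     body = "\n".join(body_lines).strip()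
--     return doc_title, section_title, body
-- ===== SOURCE B (Python) =====
-- def parse_section_payload(text):
--     lines = (text or "").splitlines()
--
--     def last_title(prefix):
--         for line in reversed(lines):
--             s = line.strip()
--             if s.startswith(prefix):
--                 return s.split(":", 1)[-1].strip()
--         return "unknown"
--
--     doc_title = last_title("# Wiki Article:")
--     section_title = last_title("## Section Title:")
--     body = "\n".join(
--         l for l in lines
--         if not l.strip().startswith("# Wiki Article:")
--         and not l.strip().startswith("## Section Title:")
--     ).strip()
--     return doc_title, section_title, body
-- ===== Notes on version B (the rewrite author's own statement) =====
-- stated objective: simpler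
-- what changed: Replaces the single classifying loop with one state triple by three independent passes: a reverse scan with early return for each title (last match wins) and a filtering comprehension for the body.
import Mathlib
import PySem

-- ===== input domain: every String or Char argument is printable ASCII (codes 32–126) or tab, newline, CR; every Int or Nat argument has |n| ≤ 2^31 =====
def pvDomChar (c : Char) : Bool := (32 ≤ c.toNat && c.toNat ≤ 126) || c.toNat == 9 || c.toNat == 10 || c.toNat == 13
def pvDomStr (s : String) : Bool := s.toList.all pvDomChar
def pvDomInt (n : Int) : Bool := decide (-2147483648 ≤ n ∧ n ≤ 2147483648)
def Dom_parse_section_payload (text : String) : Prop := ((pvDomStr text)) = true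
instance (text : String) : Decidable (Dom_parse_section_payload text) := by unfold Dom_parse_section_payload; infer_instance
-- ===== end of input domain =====

-- B replaces A's single classifying loop by three independent passes (a reverse
-- scan with early return for each title, a filter for the body): simpler decomposition.

-- ===== PORT A =====
-- stripped.split(":", 1)[-1].strip()  (split with nonempty sep always yields a
-- nonempty list, so [-1] is its last element; getD defaults are never used)
def pvExtractA (stripped : String) : String :=
  PySem.Str.strip ((((PySem.Str.splitMax? stripped ":" 1).getD []).getLast?).getD "")

-- the for-loop of A, state (doc_title, section_title, body_lines)
def pvLoopA : List String → String → String → List String → String × String × List String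
  | [], doc, sec, acc => (doc, sec, acc)
  | line :: rest, doc, sec, acc =>
    let stripped := PySem.Str.strip line
    if PySem.Str.startswith stripped "# Wiki Article:" then
      pvLoopA rest (pvExtractA stripped) sec acc
    else if PySem.Str.startswith stripped "## Section Title:" then
      pvLoopA rest doc (pvExtractA stripped) acc
    else
      pvLoopA rest doc sec (acc ++ [line])

-- '(text or "")' equals text for every string, so splitlines is applied to text directly
def parse_section_payload (text : String) : String × String × String :=
  let r := pvLoopA (PySem.Str.splitlines text) "unknown" "unknown" []
  (r.1, r.2.1, PySem.Str.strip (PySem.Str.join "\n" r.2.2))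

-- ===== PORT B =====
def pvExtractB (stripped : String) : String :=
  PySem.Str.strip ((((PySem.Str.splitMax? stripped ":" 1).getD []).getLast?).getD "")

-- 'for line in reversed(lines): … return …; return "unknown"'
def pvLastTitleB (pre : String) : List String → String
  | [] => "unknown"
  | line :: rest =>
    let s := PySem.Str.strip line
    if PySem.Str.startswith s pre then pvExtractB s else pvLastTitleB pre rest

def pvKeepB (l : String) : Bool :=
  !(PySem.Str.startswith (PySem.Str.strip l) "# Wiki Article:")
    && !(PySem.Str.startswith (PySem.Str.strip l) "## Section Title:")

def parse_section_payload_alt (text : String) : String × String × String :=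
  let lines := PySem.Str.splitlines text
  (pvLastTitleB "# Wiki Article:" lines.reverse,
   pvLastTitleB "## Section Title:" lines.reverse,
   PySem.Str.strip (PySem.Str.join "\n" (lines.filter pvKeepB)))

-- ===== PRECONDITION & SPEC =====
def Spec_parse_section_payload (text : String) (out : String × String × String) : Prop := out = parse_section_payload_alt text
instance (text : String) (out : String × String × String) : Decidable (Spec_parse_section_payload text out) := by unfold Spec_parse_section_payload; infer_instance

-- ===== CLAIM (what is proved, stated in full; the proofs are below) =====
def Claim_equal_parse_section_payload : Prop := ∀ (text : String), Dom_parse_section_payload text → Spec_parse_section_payload text (parse_section_payload text)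

-- ===== LEMMAS AND PROOFS =====

-- forward "last match wins" scan carrying the current default, used to bridge the two ports
def pvGenLast (pre : String) : List String → String → String
  | [], d => d
  | line :: rest, d =>
    let s := PySem.Str.strip line
    if PySem.Str.startswith s pre then pvGenLast pre rest (pvExtractA s) else pvGenLast pre rest d

theorem pvGenLast_if (pre : String) (xs : List String) (c : Bool) (a b : String) :
    pvGenLast pre xs (if c then a else b) = if c then pvGenLast pre xs a else pvGenLast pre xs b := by
  cases c <;> simp

theorem pvLastTitleB_reverse_append (pre : String) (lines ys : List String) :
    pvLastTitleB pre (lines.reverse ++ ys) = pvGenLast pre lines (pvLastTitleB pre ys) := by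
  induction lines generalizing ys with
  | nil => simp [pvGenLast]
  | cons l rest ih =>
    simp only [List.reverse_cons, List.append_assoc, List.singleton_append, ih, pvGenLast,
      pvLastTitleB, pvExtractB, pvExtractA]
    rw [pvGenLast_if]

-- a line cannot start with both prefixes (they differ at index 1)
theorem pv_not_both (s : String) (h1 : PySem.Str.startswith s "# Wiki Article:" = true) :
    PySem.Str.startswith s "## Section Title:" = false := by
  by_contra h2
  simp only [Bool.not_eq_false, PySem.Str.startswith_eq, PySem.Chars.startswith_iff] at h1 h2
  obtain ⟨t, ht⟩ := h1
  obtain ⟨t', ht'⟩ := h2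
  have hq := ht.trans ht'.symm
  have := congrArg (fun l => l[1]?) hq
  simp at this

theorem pvLoopA_spec (lines : List String) (doc sec : String) (acc : List String) :
    pvLoopA lines doc sec acc =
      (pvGenLast "# Wiki Article:" lines doc, pvGenLast "## Section Title:" lines sec,
       acc ++ lines.filter pvKeepB) := by
  induction lines generalizing doc sec acc with
  | nil => simp [pvLoopA, pvGenLast]
  | cons l rest ih =>
    cases hB1 : PySem.Str.startswith (PySem.Str.strip l) "# Wiki Article:" with
    | true =>
      have hB2 := pv_not_both _ hB1
      simp only [pvLoopA, pvGenLast, List.filter_cons, pvKeepB, hB1, hB2, Bool.not_true,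
        Bool.not_false, Bool.false_and, if_true, ih]
      simp
    | false =>
      cases hB2 : PySem.Str.startswith (PySem.Str.strip l) "## Section Title:" with
      | true =>
        simp only [pvLoopA, pvGenLast, List.filter_cons, pvKeepB, hB1, hB2, Bool.not_true,
          Bool.not_false, Bool.and_false, if_true, ih]
        simp
      | false =>
        simp only [pvLoopA, pvGenLast, List.filter_cons, pvKeepB, hB1, hB2,
          Bool.not_false, Bool.and_true, if_true, ih,
          List.append_assoc, List.singleton_append]
        simp

-- ===== VERDICT (by name: the statement is the Claim_ definition above) =====
theorem parse_section_payload_spec : Claim_equal_parse_section_payload := by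
  intro text _
  show _ = _
  unfold parse_section_payload parse_section_payload_alt
  rw [pvLoopA_spec]
  have hb : ∀ pre, pvLastTitleB pre (PySem.Str.splitlines text).reverse
      = pvGenLast pre (PySem.Str.splitlines text) "unknown" := by
    intro pre
    simpa [pvLastTitleB] using
      pvLastTitleB_reverse_append pre (PySem.Str.splitlines text) []
  simp [hb]
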